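-- pv_equiv track=rewrite | github.com/LiNnnNl/ScriptsGenerateAgent | backend/src/cinematography/shot_planning_stage.py | _coerce_character_list
-- ===== SOURCE A (Python) =====
-- def _coerce_character_list(value, candidates, fallback):
--     if not isinstance(value, list):
--         return list(fallback)
--     normalized = []
--     seen = set()
--     for item in value:
--         if not isinstance(item, str):
--             continue
--         item = item.strip()
--         if not item or item not in candidates or item in seen:
--             continue
--         seen.add(item)
--         normalized.append(item)
--     return normalized or list(fallback)
-- ===== SOURCE B (Python) =====
-- def _coerce_character_list(value, candidates, fallback):
--     if not isinstance(value, list):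
--         return list(fallback)
--
--     def dedup(items):
--         # remove-duplicates by recursion: keep the head, filter it out of the rest
--         if not items:
--             return []
--         head = items[0]
--         return [head] + dedup([s for s in items[1:] if s != head])
--
--     stripped = [x.strip() for x in value if isinstance(x, str)]
--     valid = [s for s in stripped if s and s in candidates]
--     return dedup(valid) or list(fallback)
-- ===== Notes on version B (the rewrite author's own statement) =====
-- stated objective: alternative
-- what changed: A's single guarded loop accumulating a result list plus a 'seen' set is replaced by staged passes (strip, then validity filter) followed by a recursive quicksort-style dedup that keeps each head and filters its duplicates out of the remaining list; no seen-set is maintained.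
import Mathlib
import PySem

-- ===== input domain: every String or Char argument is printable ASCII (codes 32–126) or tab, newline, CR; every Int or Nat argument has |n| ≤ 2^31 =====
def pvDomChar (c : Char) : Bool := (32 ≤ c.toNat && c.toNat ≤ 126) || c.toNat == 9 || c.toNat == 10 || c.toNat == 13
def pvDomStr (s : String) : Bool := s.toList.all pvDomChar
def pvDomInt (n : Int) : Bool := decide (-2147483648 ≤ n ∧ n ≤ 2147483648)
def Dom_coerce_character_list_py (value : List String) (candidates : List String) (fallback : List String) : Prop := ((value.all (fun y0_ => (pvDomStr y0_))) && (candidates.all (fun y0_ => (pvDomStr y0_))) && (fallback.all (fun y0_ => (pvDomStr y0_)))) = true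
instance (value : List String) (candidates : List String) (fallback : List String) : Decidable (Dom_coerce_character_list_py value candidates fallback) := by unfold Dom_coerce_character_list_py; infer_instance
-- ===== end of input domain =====

-- B replaces A's single loop (result list + 'seen' set) by staged strip/filter passes and a
-- recursive head-and-filter dedup; objective: alternative. Return values only, no mutation.

-- ===== PORT A =====
-- A's loop body: strip, skip empties / non-candidates / already-seen; state = (normalized, seen)
def coerceAStep (candidates : List String) (st : List String × PySem.Set String) (item0 : String) : List String × PySem.Set String :=
  let item := PySem.Str.strip item0
  if item = "" ∨ ¬ candidates.contains item ∨ st.2.contains item then st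
  else (st.1 ++ [item], PySem.Set.add st.2 item)

def coerce_character_list_py (value : List String) (candidates : List String) (fallback : List String) : List String :=
  let r := value.foldl (coerceAStep candidates) ([], PySem.Set.empty)
  if r.1 = [] then fallback else r.1

-- ===== PORT B =====
-- B's recursive dedup: keep the head, filter it out of the rest
def coerceDedup : List String → List String
  | [] => []
  | h :: t => h :: coerceDedup (t.filter (fun s => s ≠ h))
termination_by l => l.length
decreasing_by
  simp only [List.length_unattach]
  exact Nat.lt_succ_of_le (le_trans (List.length_filter_le _ _) (by simp))

def coerce_character_list_py_alt (value : List String) (candidates : List String) (fallback : List String) : List String :=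
  let stripped := value.map PySem.Str.strip
  let valid := stripped.filter (fun s => s ≠ "" && candidates.contains s)
  let d := coerceDedup valid
  if d = [] then fallback else d

-- ===== PRECONDITION & SPEC =====
def Spec_coerce_character_list_py (value : List String) (candidates : List String) (fallback : List String) (out : List String) : Prop := out = coerce_character_list_py_alt value candidates fallback
instance (value : List String) (candidates : List String) (fallback : List String) (out : List String) : Decidable (Spec_coerce_character_list_py value candidates fallback out) := by unfold Spec_coerce_character_list_py; infer_instance

-- ===== CLAIM (what is proved, stated in full; the proofs are below) =====
def Claim_equal_coerce_character_list_py : Prop := ∀ (value : List String) (candidates : List String) (fallback : List String), Dom_coerce_character_list_py value candidates fallback → Spec_coerce_character_list_py value candidates fallback (coerce_character_list_py value candidates fallback)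

-- ===== LEMMAS AND PROOFS =====

-- simp-friendly equations for the well-founded coerceDedup
theorem coerceDedup_nil : coerceDedup [] = [] := by unfold coerceDedup; rfl

theorem coerceDedup_cons (h : String) (t : List String) :
    coerceDedup (h :: t) = h :: coerceDedup (t.filter (fun s => s ≠ h)) := by
  conv_lhs => unfold coerceDedup

-- merging the two filters of B's dedup step into one membership predicate
theorem filter_notmem_append (L acc : List String) (a : String) :
    L.filter (fun s => !decide (s ∈ acc ++ [a]))
      = (L.filter (fun s => !decide (s ∈ acc))).filter (fun s => !decide (s = a)) := by
  rw [List.filter_filter]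
  apply List.filter_congr
  intro b _
  simp [List.mem_append, Bool.and_comm]

-- A's loop from a duplicated state (acc, acc) produces acc ++ coerceDedup of the not-yet-seen
-- part of B's filtered list.
theorem coerceA_loop_eq (value candidates : List String) (acc : List String) :
    (value.foldl (coerceAStep candidates) (acc, acc)).1
      = acc ++ coerceDedup
          (((value.map PySem.Str.strip).filter (fun s => s ≠ "" && candidates.contains s)).filter
            (fun s => ¬ acc.contains s)) := by
  induction value generalizing acc with
  | nil => simp [coerceDedup_nil]
  | cons x rest ih =>
    simp only [List.foldl_cons, List.map_cons, List.filter_cons]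
    by_cases hs : PySem.Str.strip x = ""
    · simp [coerceAStep, hs, ih]
    · by_cases hc : PySem.Str.strip x ∈ candidates
      · by_cases ha : PySem.Str.strip x ∈ acc
        · simp [coerceAStep, hs, hc, ha, PySem.Set.contains, ih]
        · have hstep : coerceAStep candidates (acc, acc) x
              = (acc ++ [PySem.Str.strip x], acc ++ [PySem.Str.strip x]) := by
            simp [coerceAStep, hs, hc, ha, PySem.Set.contains, PySem.Set.add]
          rw [hstep, ih (acc ++ [PySem.Str.strip x])]
          have hmem : PySem.Str.strip x ∉ acc := ha
          simp only [hs, hc, ha, decide_true, decide_false, Bool.and_true,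
            ne_eq, decide_not, List.contains_eq_mem, Bool.not_false, if_pos, decide_eq_true_eq,
            not_false_eq_true, List.filter_cons_of_pos, coerceDedup_cons, List.append_assoc,
            List.cons_append, List.nil_append]
          rw [filter_notmem_append]
      · simp [coerceAStep, hs, hc, ih]

-- ===== VERDICT (by name: the statement is the Claim_ definition above) =====
theorem coerce_character_list_py_spec : Claim_equal_coerce_character_list_py := by
  intro value candidates fallback _
  unfold Spec_coerce_character_list_py coerce_character_list_py coerce_character_list_py_alt
  have h := coerceA_loop_eq value candidates []
  simp at h
  simp only [PySem.Set.empty]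
  rw [h]
  simp [List.contains_eq_mem]
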